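-- pv_equiv track=rewrite | github.com/seva-arkh/it-academy-summer | src/HW4/List4.py | diff_el_in_one
-- ===== SOURCE A (Python) =====
-- def diff_el_in_one (list_1, list_2):
--     set_1 = set(list_1)
--     set_2 = set(list_2)
--     num_1 = 0
--     num_2 = 0
--     for el in set_1:
--         if el not in set_2:
--             num_1 += 1
--     for el in set_2:
--         if el not in set_1:
--             num_2 += 1
--     return num_1, num_2
-- ===== SOURCE B (Python) =====
-- def diff_el_in_one(list_1, list_2):
--     # inclusion-exclusion: |A\B| = |A|B| (union) minus |B|, no membership tests
--     set_1 = set(list_1)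
--     set_2 = set(list_2)
--     total = len(set_1 | set_2)
--     return total - len(set_2), total - len(set_1)
-- ===== Notes on version B (the rewrite author's own statement) =====
-- stated objective: alternative
-- what changed: Counts are derived by inclusion-exclusion arithmetic on set cardinalities (|A\B| = |A∪B| - |B|): one union is built and two subtractions replace A's per-element membership loops and branches.
import Mathlib
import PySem

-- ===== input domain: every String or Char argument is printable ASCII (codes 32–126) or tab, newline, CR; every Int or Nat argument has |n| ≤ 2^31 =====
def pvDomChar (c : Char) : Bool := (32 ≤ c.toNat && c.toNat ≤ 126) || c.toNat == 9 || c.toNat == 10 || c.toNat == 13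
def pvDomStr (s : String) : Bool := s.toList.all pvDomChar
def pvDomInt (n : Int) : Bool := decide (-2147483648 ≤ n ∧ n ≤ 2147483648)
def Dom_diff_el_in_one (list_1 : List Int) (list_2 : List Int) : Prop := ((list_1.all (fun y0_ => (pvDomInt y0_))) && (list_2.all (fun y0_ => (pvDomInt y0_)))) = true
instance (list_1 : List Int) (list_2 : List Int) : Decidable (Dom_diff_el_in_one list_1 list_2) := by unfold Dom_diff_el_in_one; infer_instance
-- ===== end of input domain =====

-- B replaces A's per-element membership-counting loops by inclusion-exclusion arithmetic on
-- set cardinalities: |A\B| = |A∪B| - |B|; alternative decomposition, same cost.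

-- ===== PORT A =====
def diff_el_in_one (list_1 : List Int) (list_2 : List Int) : Int × Int :=
  let set_1 := PySem.Set.ofList list_1
  let set_2 := PySem.Set.ofList list_2
  let num_1 : Int := 0
  let num_2 : Int := 0
  -- for el in set_1: counting is order-insensitive, so folding the Set's list is exact
  let num_1 := set_1.foldl (fun n el => if ¬ PySem.Set.contains set_2 el then n + 1 else n) num_1
  let num_2 := set_2.foldl (fun n el => if ¬ PySem.Set.contains set_1 el then n + 1 else n) num_2
  (num_1, num_2)

-- ===== PORT B =====
def diff_el_in_one_alt (list_1 : List Int) (list_2 : List Int) : Int × Int :=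
  let set_1 := PySem.Set.ofList list_1
  let set_2 := PySem.Set.ofList list_2
  let total : Int := PySem.Set.len (PySem.Set.union set_1 set_2)
  (total - PySem.Set.len set_2, total - PySem.Set.len set_1)

-- ===== PRECONDITION & SPEC =====
def Spec_diff_el_in_one (list_1 : List Int) (list_2 : List Int) (out : Int × Int) : Prop := out = diff_el_in_one_alt list_1 list_2
instance (list_1 : List Int) (list_2 : List Int) (out : Int × Int) : Decidable (Spec_diff_el_in_one list_1 list_2 out) := by unfold Spec_diff_el_in_one; infer_instance

-- ===== CLAIM (what is proved, stated in full; the proofs are below) =====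
def Claim_equal_diff_el_in_one : Prop := ∀ (list_1 : List Int) (list_2 : List Int), Dom_diff_el_in_one list_1 list_2 → Spec_diff_el_in_one list_1 list_2 (diff_el_in_one list_1 list_2)

-- ===== LEMMAS AND PROOFS =====

-- A's counting loop is the length of the filtered list.
theorem pv_count_fold (p : Int → Bool) (s : List Int) (n : Int) :
    s.foldl (fun n el => if ¬ p el then n + 1 else n) n = n + (s.filter (fun el => ¬ p el)).length := by
  induction s generalizing n with
  | nil => simp
  | cons x xs ih =>
    simp only [List.foldl_cons, List.filter_cons]
    rw [ih]
    by_cases h : p x <;> simp [h]; ring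

-- On two Nodup lists, the sublists of common elements have equal length (they are permutations).
theorem pv_common_length (s t : List Int) (hs : s.Nodup) (ht : t.Nodup) :
    (s.filter (fun el => t.contains el)).length = (t.filter (fun el => s.contains el)).length := by
  apply List.Perm.length_eq
  apply (List.perm_ext_iff_of_nodup (hs.filter _) (ht.filter _)).mpr
  intro a
  simp only [List.mem_filter, List.contains_iff_mem]
  tauto

-- Splitting a list's length by a predicate.
theorem pv_length_split (s : List Int) (p : Int → Bool) :
    s.length = (s.filter p).length + (s.filter (fun el => ¬ p el)).length := by
  induction s with
  | nil => simp
  | cons x xs ih => by_cases h : p x <;> simp [h, ih] <;> omega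

-- ===== VERDICT (by name: the statement is the Claim_ definition above) =====
theorem diff_el_in_one_spec : Claim_equal_diff_el_in_one := by
  intro l1 l2 _
  show _ = _
  simp only [diff_el_in_one, diff_el_in_one_alt, PySem.Set.len, PySem.Set.union]
  rw [PySem.Set.update_eq_append_filter]
  rw [pv_count_fold, pv_count_fold]
  have h1 := PySem.Set.nodup_ofList (α := Int) l1
  have h2 := PySem.Set.nodup_ofList (α := Int) l2
  have hc := pv_common_length (PySem.Set.ofList l1) (PySem.Set.ofList l2) h1 h2
  have e1 := pv_length_split (PySem.Set.ofList l1) (fun el => (PySem.Set.ofList l2).contains el)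
  have e2 := pv_length_split (PySem.Set.ofList l2) (fun el => (PySem.Set.ofList l1).contains el)
  refine Prod.ext ?_ ?_ <;>
    · simp only [PySem.Set.contains_eq_listContains, PySem.Set.ofList_ofList, decide_not,
        Bool.decide_eq_true, List.length_append] at hc e1 e2 ⊢
      push_cast
      omega
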